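-- pv_equiv track=rewrite | github.com/fangyuan-ksgk/arl | src/utils.py | get_layer_colors
-- ===== SOURCE A (Python) =====
-- def get_layer_colors(n_layer):
--     """Returns colors for 3 layer groups (Early, Middle, Late) using a modern palette."""
--     # "High-end" Palette (Flat UI / Modern Tech style)
--     # Group 1: Slate Blue (Cool, steady)
--     # Group 2: Mint/Teal (Fresh, bridge)
--     # Group 3: Soft Coral (Warm, output focused)
--     group_colors = ['#AED7F4', '#C8F7DC', '#FFF9C4']  # light blue, light green, light yellow
--
--     # Calculate group sizes
--     group_size = n_layer // 3
--     remainder = n_layer % 3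
--
--     colors = []
--     # Assign colors
--     for i in range(n_layer):
--         if i < group_size + (1 if remainder > 0 else 0):
--             colors.append(group_colors[0]) # Early
--         elif i < 2 * group_size + (2 if remainder > 0 else 0):
--             colors.append(group_colors[1]) # Middle
--         else:
--             colors.append(group_colors[2]) # Late
--     return colors, group_colors
-- ===== SOURCE B (Python) =====
-- def get_layer_colors(n_layer):
--     """Returns colors for 3 layer groups (Early, Middle, Late) using a modern palette."""
--     group_colors = ['#AED7F4', '#C8F7DC', '#FFF9C4']  # light blue, light green, light yellow
--     n = max(n_layer, 0)
--     group_size, remainder = divmod(n, 3)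
--     b1 = group_size + (1 if remainder > 0 else 0)
--     b2 = min(2 * group_size + (2 if remainder > 0 else 0), n)
--     colors = ([group_colors[0]] * b1
--               + [group_colors[1]] * (b2 - b1)
--               + [group_colors[2]] * (n - b2))
--     return colors, group_colors
-- ===== Notes on version B (the rewrite author's own statement) =====
-- stated objective: simpler
-- what changed: Replaced the per-index loop with three threshold branches by a closed-form construction: compute the two group boundaries once and concatenate three replicated list blocks.
import Mathlib
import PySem

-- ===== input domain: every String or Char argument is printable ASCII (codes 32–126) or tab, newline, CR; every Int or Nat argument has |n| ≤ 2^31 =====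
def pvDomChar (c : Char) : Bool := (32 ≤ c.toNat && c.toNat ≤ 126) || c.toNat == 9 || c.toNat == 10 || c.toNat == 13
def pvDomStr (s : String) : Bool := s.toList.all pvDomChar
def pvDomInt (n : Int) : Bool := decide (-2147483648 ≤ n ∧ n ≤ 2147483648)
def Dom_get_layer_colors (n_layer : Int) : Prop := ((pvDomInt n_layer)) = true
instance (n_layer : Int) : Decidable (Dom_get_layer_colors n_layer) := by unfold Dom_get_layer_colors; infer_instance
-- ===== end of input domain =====

-- B replaces A's per-index loop by concatenating three replicated color blocks computed from closed-form boundaries (objective: simpler).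

-- ===== PORT A =====
def get_layer_colors (n_layer : Int) : List String × List String :=
  let group_colors : List String := ["#AED7F4", "#C8F7DC", "#FFF9C4"]
  let group_size := PySem.Int.floordiv n_layer 3
  let remainder := PySem.Int.mod n_layer 3
  let colors := (PySem.List.pyRange 0 n_layer 1).foldl
    (fun colors i =>
      if i < group_size + (if remainder > 0 then 1 else 0) then
        colors ++ [PySem.List.pyGetD group_colors 0 ""]
      else if i < 2 * group_size + (if remainder > 0 then 2 else 0) then
        colors ++ [PySem.List.pyGetD group_colors 1 ""]
      else
        colors ++ [PySem.List.pyGetD group_colors 2 ""]) []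
  (colors, group_colors)

-- ===== PORT B =====
def get_layer_colors_alt (n_layer : Int) : List String × List String :=
  let group_colors : List String := ["#AED7F4", "#C8F7DC", "#FFF9C4"]
  let n := max n_layer 0
  let group_size := PySem.Int.floordiv n 3
  let remainder := PySem.Int.mod n 3
  let b1 := group_size + (if remainder > 0 then 1 else 0)
  let b2 := min (2 * group_size + (if remainder > 0 then 2 else 0)) n
  let colors := List.replicate b1.toNat (PySem.List.pyGetD group_colors 0 "")
             ++ List.replicate (b2 - b1).toNat (PySem.List.pyGetD group_colors 1 "")
             ++ List.replicate (n - b2).toNat (PySem.List.pyGetD group_colors 2 "")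
  (colors, group_colors)

-- ===== PRECONDITION & SPEC =====
def Spec_get_layer_colors (n_layer : Int) (out : List String × List String) : Prop := out = get_layer_colors_alt n_layer
instance (n_layer : Int) (out : List String × List String) : Decidable (Spec_get_layer_colors n_layer out) := by unfold Spec_get_layer_colors; infer_instance

-- ===== CLAIM (what is proved, stated in full; the proofs are below) =====
def Claim_equal_get_layer_colors : Prop := ∀ (n_layer : Int), Dom_get_layer_colors n_layer → Spec_get_layer_colors n_layer (get_layer_colors n_layer)

-- ===== LEMMAS AND PROOFS =====

-- A's loop, viewed as a map over range(0, n), produces three replicated blocks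
-- whose sizes are governed by the two thresholds a ≤ b.
theorem pv_key (x y z : String) (a b : Int) (n : Nat) (ha : 0 ≤ a) (hab : a ≤ b) :
    (PySem.List.pyRange 0 (n : Int) 1).map
        (fun i => if i < a then x else if i < b then y else z) =
    List.replicate (min a n).toNat x
      ++ List.replicate (min b n - min a n).toNat y
      ++ List.replicate ((n : Int) - min b n).toNat z := by
  induction n with
  | zero =>
      simp [PySem.List.pyRange_one_eq_nil (by omega : (0:Int) ≤ 0)]
      omega
  | succ m ih =>
      have hsplit : PySem.List.pyRange 0 ((m + 1 : Nat) : Int) 1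
          = PySem.List.pyRange 0 (m : Int) 1 ++ [(m : Int)] := by
        have := PySem.List.pyRange_one_succ_right (a := 0) (b := (m : Int)) (by omega)
        push_cast
        push_cast at this
        exact this
      rw [hsplit, List.map_append, ih]
      simp only [List.map_cons, List.map_nil]
      by_cases h1 : (m : Int) < a
      · rw [if_pos h1]
        have e1 : (min a ((m+1 : Nat) : Int)).toNat = (min a (m : Int)).toNat + 1 := by
          push_cast; omega
        have e2 : (min b ((m+1 : Nat) : Int) - min a ((m+1 : Nat) : Int)).toNat
            = (min b (m : Int) - min a (m : Int)).toNat := by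
          omega
        have e3 : (((m+1 : Nat) : Int) - min b ((m+1 : Nat) : Int)).toNat
            = ((m : Int) - min b (m : Int)).toNat := by
          push_cast; omega
        have m1 : (min b (m : Int) - min a (m : Int)).toNat = 0 := by omega
        have m2 : ((m : Int) - min b (m : Int)).toNat = 0 := by omega
        rw [e1, e2, e3, m1, m2, List.replicate_succ']
        simp
      · by_cases h2 : (m : Int) < b
        · rw [if_neg h1, if_pos h2]
          have e1 : (min a ((m+1 : Nat) : Int)).toNat = (min a (m : Int)).toNat := by
            push_cast; omega
          have e2 : (min b ((m+1 : Nat) : Int) - min a ((m+1 : Nat) : Int)).toNat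
              = (min b (m : Int) - min a (m : Int)).toNat + 1 := by
            push_cast; omega
          have e3 : (((m+1 : Nat) : Int) - min b ((m+1 : Nat) : Int)).toNat
              = ((m : Int) - min b (m : Int)).toNat := by
            push_cast; omega
          have m2 : ((m : Int) - min b (m : Int)).toNat = 0 := by omega
          rw [e1, e2, e3, m2, List.replicate_succ']
          simp
        · rw [if_neg h1, if_neg h2]
          have e1 : (min a ((m+1 : Nat) : Int)).toNat = (min a (m : Int)).toNat := by
            push_cast; omega
          have e2 : (min b ((m+1 : Nat) : Int) - min a ((m+1 : Nat) : Int)).toNat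
              = (min b (m : Int) - min a (m : Int)).toNat := by
            push_cast; omega
          have e3 : (((m+1 : Nat) : Int) - min b ((m+1 : Nat) : Int)).toNat
              = ((m : Int) - min b (m : Int)).toNat + 1 := by
            push_cast; omega
          rw [e1, e2, e3, List.replicate_succ']
          simp

theorem pv_foldl_map {α β : Type} (f : α → β) (xs : List α) (init : List β) :
    xs.foldl (fun acc i => acc ++ [f i]) init = init ++ xs.map f := by
  induction xs generalizing init with
  | nil => simp
  | cons hd tl ih => simp [ih]

-- ===== VERDICT (by name: the statement is the Claim_ definition above) =====
theorem get_layer_colors_spec : Claim_equal_get_layer_colors := by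
  intro n _
  unfold Spec_get_layer_colors get_layer_colors get_layer_colors_alt
  simp only
  by_cases hn : n ≤ 0
  · rw [PySem.List.pyRange_one_eq_nil hn]
    have hmax : max n 0 = 0 := by omega
    rw [hmax]
    simp [PySem.Int.floordiv, PySem.Int.mod]
  · rw [Int.not_le] at hn
    have hmax : max n 0 = n := by omega
    rw [hmax]
    set g := PySem.Int.floordiv n 3 with hg
    set r := PySem.Int.mod n 3 with hr
    have h3 : (0:Int) < 3 := by omega
    have hgd : g = n / 3 := by rw [hg, PySem.Int.floordiv_eq_ediv_of_pos h3]
    have hrd : r = n % 3 := by rw [hr, PySem.Int.mod_eq_emod_of_pos h3]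
    set a := g + (if r > 0 then 1 else 0) with hadef
    set b := 2 * g + (if r > 0 then 2 else 0) with hbdef
    have hga : 0 ≤ g := by rw [hgd]; omega
    have hnr : n = 3 * g + r ∧ 0 ≤ r ∧ r < 3 := by
      rw [hgd, hrd]; omega
    have ha : 0 ≤ a := by rw [hadef]; split_ifs <;> omega
    have hab : a ≤ b := by rw [hadef, hbdef]; split_ifs <;> omega
    have han : a ≤ n := by
      rw [hadef]; split_ifs with h
      · omega
      · omega
    have hkey := pv_key (PySem.List.pyGetD ["#AED7F4", "#C8F7DC", "#FFF9C4"] 0 "")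
        (PySem.List.pyGetD ["#AED7F4", "#C8F7DC", "#FFF9C4"] 1 "")
        (PySem.List.pyGetD ["#AED7F4", "#C8F7DC", "#FFF9C4"] 2 "")
        a b n.toNat ha hab
    have hcast : ((n.toNat : Nat) : Int) = n := by omega
    rw [hcast] at hkey
    have hfold : (PySem.List.pyRange 0 n 1).foldl
        (fun colors i =>
          if i < a then colors ++ [PySem.List.pyGetD ["#AED7F4", "#C8F7DC", "#FFF9C4"] 0 ""]
          else if i < b then colors ++ [PySem.List.pyGetD ["#AED7F4", "#C8F7DC", "#FFF9C4"] 1 ""]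
          else colors ++ [PySem.List.pyGetD ["#AED7F4", "#C8F7DC", "#FFF9C4"] 2 ""]) []
        = (PySem.List.pyRange 0 n 1).map
          (fun i => if i < a then PySem.List.pyGetD ["#AED7F4", "#C8F7DC", "#FFF9C4"] 0 ""
            else if i < b then PySem.List.pyGetD ["#AED7F4", "#C8F7DC", "#FFF9C4"] 1 ""
            else PySem.List.pyGetD ["#AED7F4", "#C8F7DC", "#FFF9C4"] 2 "") := by
      have hfun : (fun (colors : List String) i =>
          if i < a then colors ++ [PySem.List.pyGetD ["#AED7F4", "#C8F7DC", "#FFF9C4"] 0 ""]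
          else if i < b then colors ++ [PySem.List.pyGetD ["#AED7F4", "#C8F7DC", "#FFF9C4"] 1 ""]
          else colors ++ [PySem.List.pyGetD ["#AED7F4", "#C8F7DC", "#FFF9C4"] 2 ""])
          = fun (colors : List String) i => colors ++
            [if i < a then PySem.List.pyGetD ["#AED7F4", "#C8F7DC", "#FFF9C4"] 0 ""
             else if i < b then PySem.List.pyGetD ["#AED7F4", "#C8F7DC", "#FFF9C4"] 1 ""
             else PySem.List.pyGetD ["#AED7F4", "#C8F7DC", "#FFF9C4"] 2 ""] := by
        funext colors i; split_ifs <;> rfl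
      rw [hfun, pv_foldl_map]
      simp
    have hmin_a : min a n = a := by omega
    rw [hfold, hkey, hmin_a]
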